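-- pv_equiv track=rewrite | github.com/nicolasBeucher/mamba-image | src/python/packages/mamba3D/erodilLarge3D.py | _sizeSplit
-- ===== SOURCE A (Python) =====
-- def _sizeSplit(size):
--     # This internal function splits the size of the structuring element into a list of
--     # successive and decreasing sizes (except the first one). Successive erosions
--     # or dilations by double points produce an erosion or dilation by a segment
--     # of length 'size'.
--
--     sizeList=[]
--     incr=1
--     while size>incr:
--         sizeList.append(incr)
--         size=size-incr
--         incr=2*incr
--     sizeList.append(size)
--     sizeList.reverse()
--     return sizeList
-- ===== SOURCE B (Python) =====
-- def _sizeSplit(size):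
--     # Closed form: for size >= 1 the doubling loop appends 1,2,...,2**(m-1)
--     # with m = size.bit_length() - 1, leaving remainder size - (2**m - 1) in front.
--     if size < 1:
--         return [size]
--     m = size.bit_length() - 1
--     return [size - (2**m - 1)] + [2**i for i in range(m - 1, -1, -1)]
-- ===== Notes on version B (the rewrite author's own statement) =====
-- stated objective: simpler
-- what changed: Replaced the iterative doubling-and-subtracting while loop with a closed form: the bit length of size determines the number m of doubling increments, so the answer is the remainder size-(2**m-1) followed by the powers of two in decreasing order.
import Mathlib
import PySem

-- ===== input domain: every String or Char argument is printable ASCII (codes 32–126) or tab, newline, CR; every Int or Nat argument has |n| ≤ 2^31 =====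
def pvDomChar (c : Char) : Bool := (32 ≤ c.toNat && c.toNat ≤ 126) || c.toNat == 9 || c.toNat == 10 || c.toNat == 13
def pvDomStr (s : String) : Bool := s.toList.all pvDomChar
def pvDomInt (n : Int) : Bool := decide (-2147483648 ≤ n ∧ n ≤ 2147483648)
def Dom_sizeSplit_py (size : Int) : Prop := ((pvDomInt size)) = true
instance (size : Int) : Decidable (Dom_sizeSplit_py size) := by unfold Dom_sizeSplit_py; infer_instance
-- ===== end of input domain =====

-- B replaces A's doubling-and-subtracting while loop by a closed form (m = bit_length-1,
-- remainder in front, powers of two reversed); objective: simpler. Same return value everywhere.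

-- ===== PORT A =====
-- The while loop: appends incr, subtracts, doubles; carries 1 ≤ incr for termination only.
def sizeSplitLoop (size incr : Int) (sizeList : List Int) (h : 1 ≤ incr) : List Int :=
  if size > incr then
    sizeSplitLoop (size - incr) (2 * incr) (sizeList ++ [incr]) (by omega)
  else
    sizeList ++ [size]
termination_by (size - incr).toNat
decreasing_by omega

def sizeSplit_py (size : Int) : List Int :=
  (sizeSplitLoop size 1 [] (by norm_num)).reverse

-- ===== PORT B =====
-- if size < 1: return [size]; m = size.bit_length() - 1 (= Nat.log2 for positive size);
-- [size - (2**m - 1)] + [2**i for i in range(m-1, -1, -1)]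
def sizeSplit_py_alt (size : Int) : List Int :=
  if size < 1 then [size]
  else
    let m := size.toNat.log2
    (size - (2 ^ m - 1)) :: (List.range m).reverse.map (fun i => ((2 : Int) ^ i))

-- ===== PRECONDITION & SPEC =====
def Spec_sizeSplit_py (size : Int) (out : List Int) : Prop := out = sizeSplit_py_alt size
instance (size : Int) (out : List Int) : Decidable (Spec_sizeSplit_py size out) := by unfold Spec_sizeSplit_py; infer_instance

-- ===== CLAIM (what is proved, stated in full; the proofs are below) =====
def Claim_equal_sizeSplit_py : Prop := ∀ (size : Int), Dom_sizeSplit_py size → Spec_sizeSplit_py size (sizeSplit_py size)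

-- ===== LEMMAS AND PROOFS =====

-- Forward-order body of A's loop with incr = 2^k, accumulator stripped.
def bodyAux (size : Int) (k : Nat) : List Int :=
  if size > 2 ^ k then (2 ^ k : Int) :: bodyAux (size - 2 ^ k) (k + 1) else [size]
termination_by size.toNat
decreasing_by
  have hk : (0 : Int) < 2 ^ k := by positivity
  omega

lemma sizeSplitLoop_eq_bodyAux (size : Int) (k : Nat) :
    ∀ (incr : Int) (acc : List Int) (h : 1 ≤ incr), incr = 2 ^ k →
      sizeSplitLoop size incr acc h = acc ++ bodyAux size k := by
  fun_induction bodyAux size k with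
  | case1 s k hgt ih =>
      intro incr acc h he
      subst he
      rw [sizeSplitLoop, if_pos hgt]
      rw [ih (2 * 2 ^ k) _ _ (by ring)]
      simp
  | case2 s k hle =>
      intro incr acc h he
      subst he
      rw [sizeSplitLoop]
      simp [hle]

lemma bodyAux_closed (t : Nat) : ∀ (s : Int) (k : Nat), 1 ≤ s →
    s + 2 ^ k ≤ 2 ^ (k + t + 1) → 2 ^ (k + t) < s + 2 ^ k →
    bodyAux s k = (List.range' k t).map (fun i => ((2 : Int) ^ i)) ++ [s - (2 ^ (k + t) - 2 ^ k)] := by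
  induction t with
  | zero =>
      intro s k h1 hub hlb
      simp only [Nat.add_zero] at hub hlb ⊢
      rw [bodyAux]
      have h2 : (2:Int) ^ (k + 1) = 2 * 2 ^ k := by ring
      have hng : ¬ s > 2 ^ k := by omega
      simp [hng]
  | succ t ih =>
      intro s k h1 hub hlb
      have hpow : (2:Int) ^ (k + 1) = 2 * 2 ^ k := by ring
      have hk : (0 : Int) < 2 ^ k := by positivity
      have hkt : (2:Int) ^ (k + t) ≤ 2 ^ (k + t + 1) := by
        have : (2:Int) ^ (k + t + 1) = 2 * 2 ^ (k + t) := by ring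
        have h0 : (0:Int) < 2 ^ (k + t) := by positivity
        omega
      have hgt : s > 2 ^ k := by
        have h2 : (2:Int) ^ (k + (t + 1)) = 2 * 2 ^ (k + t) := by ring
        have h3 : (2:Int) ^ (k + t) ≥ 2 ^ k := by
          apply pow_le_pow_right₀ <;> omega
        omega
      rw [bodyAux]
      simp only [hgt, if_pos]
      rw [ih (s - 2 ^ k) (k + 1) (by omega)
          (by rw [show k + 1 + t + 1 = k + (t + 1) + 1 by ring]; omega)
          (by rw [show k + 1 + t = k + (t + 1) by ring]; omega)]
      rw [List.range'_succ]
      simp only [List.map_cons, List.cons_append]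
      congr 3
      · rw [show k + 1 + t = k + (t + 1) by ring, hpow]; ring

lemma bodyAux_log2 (s : Int) (h1 : 1 ≤ s) :
    bodyAux s 0 = (List.range s.toNat.log2).map (fun i => ((2 : Int) ^ i))
      ++ [s - (2 ^ s.toNat.log2 - 1)] := by
  set m := s.toNat.log2 with hm
  have hs0 : s.toNat ≠ 0 := by omega
  have hlow : 2 ^ m ≤ s.toNat := Nat.log2_self_le hs0
  have hhigh : s.toNat < 2 ^ (m + 1) := Nat.lt_log2_self
  have hlowI : (2 : Int) ^ m ≤ s := by
    calc (2 : Int) ^ m = ((2 ^ m : Nat) : Int) := by push_cast; ring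
    _ ≤ (s.toNat : Int) := by exact_mod_cast hlow
    _ = s := by omega
  have hhighI : s < (2 : Int) ^ (m + 1) := by
    calc s = (s.toNat : Int) := by omega
    _ < ((2 ^ (m + 1) : Nat) : Int) := by exact_mod_cast hhigh
    _ = (2 : Int) ^ (m + 1) := by push_cast; ring
  have := bodyAux_closed m s 0 h1
    (by simpa using by omega)
    (by simpa using by omega)
  simpa [List.range_eq_range'] using this
  
-- ===== VERDICT (by name: the statement is the Claim_ definition above) =====
theorem sizeSplit_py_spec : Claim_equal_sizeSplit_py := by
  intro size _
  unfold Spec_sizeSplit_py sizeSplit_py sizeSplit_py_alt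
  rw [sizeSplitLoop_eq_bodyAux size 0 1 [] (by norm_num) (by norm_num)]
  by_cases h : size < 1
  · have hng : ¬ size > (2 : Int) ^ 0 := by simp only [pow_zero]; omega
    rw [bodyAux, if_neg hng]
    simp [h]
  · rw [bodyAux_log2 size (by omega)]
    simp [h, List.map_reverse]
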